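-- pv_equiv track=rewrite | github.com/trickybestia/sm-verilog | create-blueprint/cell.py | _input_name
-- ===== SOURCE A (Python) =====
-- def _input_name(i: int) -> str:
--     ALPHABET = "ABCDEFGHIJKLMNOPQRSTUVWXZabcdefghijklmnopqrstuvwxyz"
--
--     if i == 0:
--         return ALPHABET[0]
--
--     result = ""
--
--     while i != 0:
--         result += ALPHABET[i % len(ALPHABET)]
--         i //= len(ALPHABET)
--
--     return result[::-1]
-- ===== SOURCE B (Python) =====
-- def _input_name(i: int) -> str:
--     ALPHABET = "ABCDEFGHIJKLMNOPQRSTUVWXZabcdefghijklmnopqrstuvwxyz"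
--
--     if i == 0:
--         return ALPHABET[0]
--
--     # find the highest power of 51 not exceeding i
--     p = 1
--     while p * 51 <= i:
--         p *= 51
--
--     # emit digits most-significant-first; no reversal needed
--     result = ""
--     while p > 0:
--         result += ALPHABET[(i // p) % 51]
--         p //= 51
--
--     return result
-- ===== Notes on version B (the rewrite author's own statement) =====
-- stated objective: alternative
-- what changed: Replaced the LSD-first accumulate-then-reverse loop by an MSD-first iteration: first find the highest power of 51 not exceeding i, then extract each digit as (i // p) % 51 while dividing the power down, so no reversal is needed.
-- outside the precondition, e.g. on _input_name(-1): A does not finish within the time limit, B returns 'z'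
import Mathlib
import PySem

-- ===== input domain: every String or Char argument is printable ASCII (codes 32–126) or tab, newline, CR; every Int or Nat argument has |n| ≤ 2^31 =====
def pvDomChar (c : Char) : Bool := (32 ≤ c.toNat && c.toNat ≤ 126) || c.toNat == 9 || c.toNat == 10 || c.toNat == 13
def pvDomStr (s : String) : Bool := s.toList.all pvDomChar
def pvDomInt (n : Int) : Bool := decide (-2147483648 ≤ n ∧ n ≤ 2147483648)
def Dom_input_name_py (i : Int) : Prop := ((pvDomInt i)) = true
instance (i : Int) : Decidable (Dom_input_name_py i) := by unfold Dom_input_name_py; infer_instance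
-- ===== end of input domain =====

-- B replaces A's LSD-first accumulate-then-reverse loop by an MSD-first iteration (find the
-- highest power of 51 ≤ i, then peel digits top-down); Pre_ restricts to i ≥ 0 because on
-- negative i Python A's while loop never terminates (i //= 51 stalls at -1).


-- ===== PORT A =====
def pvAlpha : List Char := "ABCDEFGHIJKLMNOPQRSTUVWXZabcdefghijklmnopqrstuvwxyz".toList

-- A's while loop: result += ALPHABET[i % 51]; i //= 51.  On the admitted domain i ≥ 0,
-- so Python's % and // coincide with Nat's % and /; recursion is on the Nat value of i.
def pvLoopA (n : Nat) (acc : List Char) : List Char :=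
  if n = 0 then acc
  else pvLoopA (n / 51) (acc ++ [pvAlpha.getD (n % 51) ' '])
decreasing_by exact Nat.div_lt_self (Nat.pos_of_ne_zero (by assumption)) (by norm_num)

def input_name_py (i : Int) : String :=
  if i = 0 then String.ofList [pvAlpha.getD 0 ' ']
  else String.ofList (pvLoopA i.toNat []).reverse

-- ===== PORT B =====
-- B's first loop: p = 1; while p * 51 <= i: p *= 51  (highest power of 51 ≤ i)
def pvPowLoop (n p : Nat) (hp : 0 < p) : Nat :=
  if h : p * 51 ≤ n then pvPowLoop n (p * 51) (by omega) else p
termination_by n - p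
decreasing_by omega

-- B's second loop: while p > 0: result += ALPHABET[(i // p) % 51]; p //= 51
def pvBuildB (n p : Nat) : List Char :=
  if h : p = 0 then []
  else pvAlpha.getD (n / p % 51) ' ' :: pvBuildB n (p / 51)
decreasing_by exact Nat.div_lt_self (Nat.pos_of_ne_zero (by assumption)) (by norm_num)

def input_name_py_alt (i : Int) : String :=
  if i = 0 then String.ofList [pvAlpha.getD 0 ' ']
  else String.ofList (pvBuildB i.toNat (pvPowLoop i.toNat 1 Nat.one_pos))

-- ===== PRECONDITION & SPEC =====
-- Pre_ excludes negative i: there Python A DIVERGES (the while loop's i //= 51 is stuck at -1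
-- and i never reaches 0), so A returns no value to match.
def Pre_input_name_py (i : Int) : Prop := 0 ≤ i
instance (i : Int) : Decidable (Pre_input_name_py i) := by unfold Pre_input_name_py; infer_instance
def pvWitness_input_name_py : Int := (7)

def Spec_input_name_py (i : Int) (out : String) : Prop := out = input_name_py_alt i
instance (i : Int) (out : String) : Decidable (Spec_input_name_py i out) := by unfold Spec_input_name_py; infer_instance

-- ===== CLAIM (what is proved, stated in full; the proofs are below) =====
def Claim_equal_input_name_py : Prop := ∀ (i : Int), Dom_input_name_py i → Pre_input_name_py i → Spec_input_name_py i (input_name_py i)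

-- ===== LEMMAS AND PROOFS =====
-- The LSD-first digit string A's loop accumulates.
def pvDigitsLSD (n : Nat) : List Char :=
  if n = 0 then [] else pvAlpha.getD (n % 51) ' ' :: pvDigitsLSD (n / 51)
decreasing_by exact Nat.div_lt_self (Nat.pos_of_ne_zero (by assumption)) (by norm_num)

theorem pvLoopA_eq (n : Nat) : ∀ acc, pvLoopA n acc = acc ++ pvDigitsLSD n := by
  induction n using Nat.strong_induction_on with
  | _ n ih =>
    intro acc
    by_cases h : n = 0
    · subst h; simp [pvLoopA, pvDigitsLSD]
    · rw [pvLoopA, pvDigitsLSD, if_neg h, if_neg h,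
        ih (n / 51) (Nat.div_lt_self (Nat.pos_of_ne_zero h) (by norm_num))]
      simp

theorem pvPowLoop_spec (n : Nat) : ∀ p (hp : 0 < p), p ≤ n →
    ∃ k, pvPowLoop n p hp = p * 51 ^ k ∧ p * 51 ^ k ≤ n ∧ n < p * 51 ^ (k + 1) := by
  intro p hp hpn
  induction p, hp using pvPowLoop.induct n with
  | case1 p hp h ih =>
    obtain ⟨k, hk, h1, h2⟩ := ih h
    refine ⟨k + 1, ?_, ?_, ?_⟩
    · rw [pvPowLoop, dif_pos h, hk]; ring
    · calc p * 51 ^ (k + 1) = p * 51 * 51 ^ k := by ring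
        _ ≤ n := h1
    · calc n < p * 51 * 51 ^ (k + 1) := h2
        _ = p * 51 ^ (k + 1 + 1) := by ring
  | case2 p hp h =>
    exact ⟨0, by rw [pvPowLoop, dif_neg h]; ring, by simpa using hpn, by simpa using Nat.lt_of_not_le h⟩

-- B's digit loop at p = 51^k produces the k+1 digits (i / 51^j) % 51, j = k … 0.
theorem pvBuildB_pow (k : Nat) (n : Nat) :
    pvBuildB n (51 ^ k) =
      ((List.range (k + 1)).map (fun j => pvAlpha.getD (n / 51 ^ j % 51) ' ')).reverse := by
  induction k with
  | zero =>
    simp only [pow_zero]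
    rw [pvBuildB, dif_neg one_ne_zero, show (1:Nat)/51 = 0 by norm_num, pvBuildB]
    simp
  | succ k ih =>
    rw [pvBuildB, dif_neg (by positivity)]
    have h51 : 51 ^ (k + 1) / 51 = 51 ^ k := by
      rw [pow_succ, Nat.mul_div_cancel _ (by norm_num)]
    rw [h51, ih, List.range_succ (n := k + 1)]
    simp

-- When 51^m ≤ n < 51^(m+1), those m+1 digits (LSD-first) are exactly A's digit list.
theorem pvRange_digits (m : Nat) : ∀ n, 51 ^ m ≤ n → n < 51 ^ (m + 1) →
    (List.range (m + 1)).map (fun j => pvAlpha.getD (n / 51 ^ j % 51) ' ') = pvDigitsLSD n := by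
  induction m with
  | zero =>
    intro n h1 h2
    rw [pvDigitsLSD, if_neg (by omega)]
    rw [pvDigitsLSD, if_pos (by simp at h2; omega)]
    simp
  | succ m ih =>
    intro n h1 h2
    have hne : n ≠ 0 := by have := Nat.one_le_iff_ne_zero.mp (le_trans (Nat.one_le_pow _ _ (by norm_num)) h1); omega
    rw [List.range_succ_eq_map, pvDigitsLSD, if_neg hne]
    simp only [List.map_cons, List.map_map, pow_zero, Nat.div_one]
    congr 1
    have hdiv : ∀ j, n / 51 ^ (j + 1) = n / 51 / 51 ^ j := by
      intro j; rw [pow_succ']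
      rw [Nat.div_div_eq_div_mul]
    have h1' : 51 ^ m ≤ n / 51 := by
      rw [Nat.le_div_iff_mul_le (by norm_num)]
      calc 51 ^ m * 51 = 51 ^ (m + 1) := by ring
        _ ≤ n := h1
    have h2' : n / 51 < 51 ^ (m + 1) := by
      rw [Nat.div_lt_iff_lt_mul (by norm_num)]
      calc n < 51 ^ (m + 1 + 1) := h2
        _ = 51 ^ (m + 1) * 51 := by ring
    rw [← ih (n / 51) h1' h2']
    apply List.map_congr_left
    intro j _
    simp [hdiv j]

-- ===== VERDICT (by name: the statement is the Claim_ definition above) =====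
theorem input_name_py_spec : Claim_equal_input_name_py := by
  intro i _ hpre
  have hpre' : 0 ≤ i := hpre
  unfold Spec_input_name_py input_name_py input_name_py_alt
  by_cases h : i = 0
  · simp [h]
  · rw [if_neg h, if_neg h]
    have hn : 1 ≤ i.toNat := by omega
    obtain ⟨k, hk, h1, h2⟩ := pvPowLoop_spec i.toNat 1 Nat.one_pos hn
    rw [hk, one_mul, pvBuildB_pow, pvLoopA_eq, List.nil_append,
      pvRange_digits k i.toNat (by simpa using h1) (by simpa using h2)]
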